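-- pv_equiv track=rewrite | github.com/chirimiri22/cleverminer-app | backend/src/helpers.py | group_counts_to_intervals
-- ===== SOURCE A (Python) =====
-- def group_counts_to_intervals(counts: list[int]) -> list[list[int]]:
--     intervals = []
--     start = 0
--     for count in counts:
--         end = start + count - 1
--         intervals.append([start, end])
--         start = end + 1
--     return intervals
-- ===== SOURCE B (Python) =====
-- def group_counts_to_intervals(counts: list[int]) -> list[list[int]]:
--     # phase 1: prefix-sum table of running end boundaries
--     ends = []
--     total = 0
--     for c in counts:
--         total += c
--         ends.append(total)
--     # phase 2: starts are the boundaries shifted by one; pair them up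
--     starts = [0] + ends[:-1]
--     return [[s, e - 1] for s, e in zip(starts, ends)]
-- ===== Notes on version B (the rewrite author's own statement) =====
-- stated objective: alternative
-- what changed: Replaces the single cursor-threading loop with two phases: a prefix-sum table of cumulative end boundaries, then a zip/pairing pass that derives each interval from adjacent boundaries.
import Mathlib
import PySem

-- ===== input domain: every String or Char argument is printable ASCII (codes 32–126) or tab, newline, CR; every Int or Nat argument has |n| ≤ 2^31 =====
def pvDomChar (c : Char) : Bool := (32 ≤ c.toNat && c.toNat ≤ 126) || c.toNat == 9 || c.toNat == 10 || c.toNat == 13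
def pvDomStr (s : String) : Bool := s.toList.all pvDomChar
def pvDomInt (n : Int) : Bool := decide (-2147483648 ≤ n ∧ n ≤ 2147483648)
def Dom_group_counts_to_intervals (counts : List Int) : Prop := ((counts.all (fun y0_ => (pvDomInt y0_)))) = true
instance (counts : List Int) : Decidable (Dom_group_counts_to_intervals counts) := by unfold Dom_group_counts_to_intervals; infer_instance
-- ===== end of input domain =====

-- B: same intervals via a prefix-sum table of end boundaries plus a pairing pass (alternative decomposition; return value only).
-- ===== PORT A =====
-- A threads a single `start` cursor through one loop, appending [start, start+count-1].
def group_counts_to_intervals (counts : List Int) : List (List Int) :=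
  (counts.foldl
    (fun (acc : List (List Int) × Int) count =>
      let eend := acc.2 + count - 1
      (acc.1 ++ [[acc.2, eend]], eend + 1))
    ([], 0)).1

-- ===== PORT B =====
-- phase 1 of Source B: running totals `ends`
def pvEnds (counts : List Int) : List Int :=
  (counts.foldl (fun (acc : List Int × Int) c => (acc.1 ++ [acc.2 + c], acc.2 + c)) ([], 0)).1

def group_counts_to_intervals_alt (counts : List Int) : List (List Int) :=
  let ends := pvEnds counts
  let starts := 0 :: ends.dropLast        -- [0] + ends[:-1]
  (starts.zip ends).map (fun p => [p.1, p.2 - 1])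

-- ===== PRECONDITION & SPEC =====
def Spec_group_counts_to_intervals (counts : List Int) (out : List (List Int)) : Prop := out = group_counts_to_intervals_alt counts
instance (counts : List Int) (out : List (List Int)) : Decidable (Spec_group_counts_to_intervals counts out) := by unfold Spec_group_counts_to_intervals; infer_instance

-- ===== CLAIM (what is proved, stated in full; the proofs are below) =====
def Claim_equal_group_counts_to_intervals : Prop := ∀ (counts : List Int), Dom_group_counts_to_intervals counts → Spec_group_counts_to_intervals counts (group_counts_to_intervals counts)

-- ===== LEMMAS AND PROOFS =====

-- ===== VERDICT (by name: the statement is the Claim_ definition above) =====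
-- f s cs: A's tail of intervals starting from cursor s
def pvA (s : Int) : List Int → List (List Int)
  | [] => []
  | c :: cs => [s, s + c - 1] :: pvA (s + c) cs

-- g t cs: running totals starting from t
def pvG (t : Int) : List Int → List Int
  | [] => []
  | c :: cs => (t + c) :: pvG (t + c) cs

theorem foldlA (cs : List Int) : ∀ (is : List (List Int)) (s : Int),
    (cs.foldl (fun (acc : List (List Int) × Int) count =>
        let eend := acc.2 + count - 1
        (acc.1 ++ [[acc.2, eend]], eend + 1)) (is, s)).1 = is ++ pvA s cs := by
  induction cs with
  | nil => intro is s; simp [pvA]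
  | cons c cs ih =>
      intro is s
      simp only [List.foldl_cons, pvA]
      rw [ih]
      simp

theorem foldlG (cs : List Int) : ∀ (es : List Int) (t : Int),
    (cs.foldl (fun (acc : List Int × Int) c => (acc.1 ++ [acc.2 + c], acc.2 + c)) (es, t)).1
      = es ++ pvG t cs := by
  induction cs with
  | nil => intro es t; simp [pvG]
  | cons c cs ih =>
      intro es t
      simp only [List.foldl_cons, pvG]
      rw [ih]
      simp

theorem zip_pvG (cs : List Int) : ∀ (s : Int),
    ((( s :: (pvG s cs).dropLast).zip (pvG s cs)).map (fun p => [p.1, p.2 - 1])) = pvA s cs := by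
  induction cs with
  | nil => intro s; simp [pvG, pvA]
  | cons c cs ih =>
      intro s
      cases cs with
      | nil => simp [pvG, pvA]
      | cons d ds =>
          have h := ih (s + c)
          simp only [pvG, pvA] at h ⊢
          rw [List.dropLast_cons₂, List.zip_cons_cons, List.map_cons, h]

theorem group_counts_to_intervals_spec : Claim_equal_group_counts_to_intervals := by
  intro counts _
  unfold Spec_group_counts_to_intervals group_counts_to_intervals group_counts_to_intervals_alt pvEnds
  rw [foldlA, foldlG]
  simp only [List.nil_append]
  exact (zip_pvG counts 0).symm
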